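-- pv_equiv track=rewrite | github.com/cdr60/raspberry_python_wifi | wificheck.py | get_encryption
-- ===== SOURCE A (Python) =====
-- def get_encryption(cell):
-- 	enc=""
-- 	if matching_line(cell,"Encryption key:") == "off":
-- 		enc="Open"
-- 	else:
-- 		for line in cell:
-- 			matching = match(line,"IE:")
-- 			if matching!=None:
-- 				wpa=match(matching,"WPA Version ")
-- 				if wpa!=None:
-- 					enc="WPA v."+wpa
-- 		if enc=="":
-- 			enc="WEP"
-- 	return enc
--
-- def matching_line(lines, keyword):
-- 	"""Returns the first matching line in a list of lines. See match()"""
-- 	for line in lines: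
-- 		matching=match(line,keyword)
-- 		if matching!=None:
-- 			return matching
-- 	return None
--
-- def match(line,keyword):
-- 	"""If the first part of line (modulo blanks) matches keyword,
-- 	returns the end of that line. Otherwise returns None"""
-- 	line=line.lstrip()
-- 	length=len(keyword)
-- 	if line[:length] == keyword:
-- 		return line[length:]
-- 	else:
-- 		return None
-- ===== SOURCE B (Python) =====
-- def get_encryption(cell):
--     key_value = None
--     last_wpa = None
--     for line in cell:
--         if key_value is None:
--             key_value = match(line, "Encryption key:")
--         ie = match(line, "IE:")
--         if ie is not None:
--             wpa = match(ie, "WPA Version ")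
--             if wpa is not None:
--                 last_wpa = wpa
--     if key_value == "off":
--         return "Open"
--     if last_wpa is not None:
--         return "WPA v." + last_wpa
--     return "WEP"
--
-- def match(line, keyword):
--     line = line.lstrip()
--     length = len(keyword)
--     if line[:length] == keyword:
--         return line[length:]
--     else:
--         return None
-- ===== Notes on version B (the rewrite author's own statement) =====
-- stated objective: simpler
-- what changed: Replaces the two separate scans (matching_line for the key, then a second loop for the last WPA line) by one pass that tracks the first 'Encryption key:' match and the last WPA version together, deciding at the end.
import Mathlib
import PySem

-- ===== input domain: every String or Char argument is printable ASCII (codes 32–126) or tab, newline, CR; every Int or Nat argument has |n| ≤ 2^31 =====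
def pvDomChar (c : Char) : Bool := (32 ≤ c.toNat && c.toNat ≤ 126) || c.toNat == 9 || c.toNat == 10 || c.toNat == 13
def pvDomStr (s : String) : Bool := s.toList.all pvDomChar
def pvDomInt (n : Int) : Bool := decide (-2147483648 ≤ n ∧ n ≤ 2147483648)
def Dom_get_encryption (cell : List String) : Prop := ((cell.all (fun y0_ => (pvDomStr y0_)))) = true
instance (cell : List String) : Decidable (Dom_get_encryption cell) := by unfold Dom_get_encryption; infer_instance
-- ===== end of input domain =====

-- B merges A's two scans (matching_line for the key, second loop for the last WPA line) into one accumulating pass; objective: simpler.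

-- shared helper: port of the module-level match(line, keyword) both Pythons use
def pvMatch (line keyword : String) : Option String :=
  let line := PySem.Str.lstrip line
  let length : Int := (PySem.Str.len keyword : Int)
  if PySem.Str.slice line none (some length) = keyword then
    some (PySem.Str.slice line (some length) none)
  else
    none

-- ===== PORT A =====
-- port of matching_line(lines, keyword): first matching line
def pvMatchingLine : List String → String → Option String
  | [], _ => none
  | l :: ls, kw =>
    match pvMatch l kw with
    | some m => some m
    | none => pvMatchingLine ls kw

-- the body of A's for-loop over `cell` (enc is the loop state)
def pvStepA (enc : String) (line : String) : String :=
  match pvMatch line "IE:" with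
  | none => enc
  | some matching =>
    match pvMatch matching "WPA Version " with
    | none => enc
    | some wpa => "WPA v." ++ wpa

def get_encryption (cell : List String) : String :=
  if pvMatchingLine cell "Encryption key:" = some "off" then "Open"
  else
    let enc := cell.foldl pvStepA ""
    if enc = "" then "WEP" else enc

-- ===== PORT B =====
def pvStepB (st : Option String × Option String) (line : String) : Option String × Option String :=
  let kv := match st.1 with
    | some v => some v
    | none => pvMatch line "Encryption key:"
  let lw := match pvMatch line "IE:" with
    | none => st.2
    | some ie =>
      match pvMatch ie "WPA Version " with
      | none => st.2
      | some wpa => some wpa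
  (kv, lw)

def get_encryption_alt (cell : List String) : String :=
  let st := cell.foldl pvStepB (none, none)
  if st.1 = some "off" then "Open"
  else
    match st.2 with
    | some wpa => "WPA v." ++ wpa
    | none => "WEP"

-- ===== PRECONDITION & SPEC =====
def Spec_get_encryption (cell : List String) (out : String) : Prop := out = get_encryption_alt cell
instance (cell : List String) (out : String) : Decidable (Spec_get_encryption cell out) := by unfold Spec_get_encryption; infer_instance

-- ===== CLAIM (what is proved, stated in full; the proofs are below) =====
def Claim_equal_get_encryption : Prop := ∀ (cell : List String), Dom_get_encryption cell → Spec_get_encryption cell (get_encryption cell)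

-- ===== LEMMAS AND PROOFS =====

-- B's pair fold is the pair of the two component folds
def pvStep1 (a : Option String) (line : String) : Option String :=
  match a with
  | some v => some v
  | none => pvMatch line "Encryption key:"

def pvStep2 (b : Option String) (line : String) : Option String :=
  match pvMatch line "IE:" with
  | none => b
  | some ie =>
    match pvMatch ie "WPA Version " with
    | none => b
    | some wpa => some wpa

theorem foldB_pair (cell : List String) (a b : Option String) :
    cell.foldl pvStepB (a, b) = (cell.foldl pvStep1 a, cell.foldl pvStep2 b) := by
  induction cell generalizing a b with
  | nil => rfl
  | cons l ls ih =>
    simp only [List.foldl_cons, ih, pvStepB, pvStep1, pvStep2]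

-- component 1 starting from `some v` stays `some v`
theorem fold1_some (cell : List String) (v : String) :
    cell.foldl pvStep1 (some v) = some v := by
  induction cell with
  | nil => rfl
  | cons l ls ih => rw [List.foldl_cons]; exact ih

-- component 1 computes A's matching_line
theorem fold1_eq_matchingLine (cell : List String) :
    cell.foldl pvStep1 none = pvMatchingLine cell "Encryption key:" := by
  induction cell with
  | nil => rfl
  | cons l ls ih =>
    simp only [List.foldl_cons, pvMatchingLine, pvStep1]
    cases pvMatch l "Encryption key:" with
    | none => exact ih
    | some m => exact fold1_some ls m

-- the encoding of the wpa accumulator: "" for none, "WPA v."++w for some w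
def pvEnc : Option String → String
  | none => ""
  | some w => "WPA v." ++ w

-- A's loop body matches B's wpa component under the encoding
theorem stepA_enc (b : Option String) (l : String) :
    pvStepA (pvEnc b) l = pvEnc (pvStep2 b l) := by
  cases h1 : pvMatch l "IE:" with
  | none => simp only [pvStepA, pvStep2, h1]
  | some ie =>
    cases h2 : pvMatch ie "WPA Version " with
    | none => simp only [pvStepA, pvStep2, h1, h2]
    | some wpa => simp only [pvStepA, pvStep2, h1, h2, pvEnc]

-- A's second loop is component 2 under the encoding
theorem foldA_eq_fold2 (cell : List String) (b : Option String) :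
    cell.foldl pvStepA (pvEnc b) = pvEnc (cell.foldl pvStep2 b) := by
  induction cell generalizing b with
  | nil => rfl
  | cons l ls ih =>
    rw [List.foldl_cons, List.foldl_cons, stepA_enc]
    exact ih (pvStep2 b l)

theorem pvEnc_some_ne_empty (w : String) : ("WPA v." ++ w) ≠ "" := by
  intro h
  have h2 := congrArg String.length h
  simp [String.length_append] at h2

-- ===== VERDICT (by name: the statement is the Claim_ definition above) =====
theorem get_encryption_spec : Claim_equal_get_encryption := by
  intro cell _
  unfold Spec_get_encryption get_encryption get_encryption_alt
  rw [foldB_pair, fold1_eq_matchingLine]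
  by_cases hk : pvMatchingLine cell "Encryption key:" = some "off"
  · rw [if_pos hk, if_pos hk]
  · rw [if_neg hk, if_neg hk]
    have h2 := foldA_eq_fold2 cell none
    rw [show pvEnc none = "" from rfl] at h2
    show (if List.foldl pvStepA "" cell = "" then "WEP" else List.foldl pvStepA "" cell)
        = match List.foldl pvStep2 none cell with
          | some wpa => "WPA v." ++ wpa
          | none => "WEP"
    rw [h2]
    cases h : List.foldl pvStep2 none cell with
    | none => rw [show pvEnc none = "" from rfl, if_pos rfl]
    | some w =>
      rw [if_neg (show pvEnc (some w) ≠ "" from pvEnc_some_ne_empty w)]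
      rfl
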